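-- pv_equiv track=rewrite | github.com/moewiee/300baicode | 178_faultySensor.py | badSensor
-- ===== SOURCE A (Python) =====
-- def badSensor(sensor1: list, sensor2: list) -> int:
--     while sensor1 and sensor1[0] == sensor2[0]:
--         sensor1.pop(0)
--         sensor2.pop(0)
--     if len(sensor1) == 0: return -1
--     if sensor1[:-1] == sensor2[1:] and sensor2[:-1] != sensor1[1:]: return 1
--     if sensor2[:-1] == sensor1[1:] and sensor1[:-1] != sensor2[1:]: return 2
--     return -1
-- ===== SOURCE B (Python) =====
-- def badSensor(sensor1: list, sensor2: list) -> int: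
--     i = 0
--     while i < min(len(sensor1), len(sensor2)) and sensor1[i] == sensor2[i]:
--         i += 1
--     if i == len(sensor1):
--         return -1
--     dropped1 = sensor1[i:-1] == sensor2[i + 1:]
--     dropped2 = sensor2[i:-1] == sensor1[i + 1:]
--     if dropped1 == dropped2:
--         return -1
--     return 1 if dropped1 else 2
-- ===== Notes on version B (the rewrite author's own statement) =====
-- stated objective: faster
-- what changed: B replaces A's destructive pop(0) stripping loop (quadratic, and mutating both arguments) with a single index scan for the first mismatch followed by offset slice comparisons on the untouched lists; Pre_ excludes exactly the inputs where A raises IndexError (sensor2 a proper prefix of sensor1).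
import Mathlib
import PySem

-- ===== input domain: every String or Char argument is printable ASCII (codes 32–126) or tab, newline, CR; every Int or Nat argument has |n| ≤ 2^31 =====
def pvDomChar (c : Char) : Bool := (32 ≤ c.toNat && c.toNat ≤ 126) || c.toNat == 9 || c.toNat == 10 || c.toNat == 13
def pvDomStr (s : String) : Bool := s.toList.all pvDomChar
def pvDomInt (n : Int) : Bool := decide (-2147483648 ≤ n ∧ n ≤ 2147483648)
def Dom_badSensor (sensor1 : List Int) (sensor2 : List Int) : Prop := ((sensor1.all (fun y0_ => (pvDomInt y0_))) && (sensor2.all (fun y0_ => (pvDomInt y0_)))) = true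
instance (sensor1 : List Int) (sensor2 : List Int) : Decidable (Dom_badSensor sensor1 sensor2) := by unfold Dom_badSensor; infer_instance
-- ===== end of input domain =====

-- B replaces A's destructive pop(0) stripping loop (quadratic, mutates both arguments) with a
-- single index scan for the first mismatch plus offset slice comparisons on the untouched lists;
-- Python A pops the common prefix off both argument lists in place, B does not mutate them —
-- the equivalence proved here is about the return value.

-- ===== PORT A =====
-- A's while loop: pop the common prefix off both lists; returns the remaining suffixes.
def aLoop : List Int → List Int → List Int × List Int
  | x :: xs, y :: ys => if x = y then aLoop xs ys else (x :: xs, y :: ys)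
  | [], ys => ([], ys)
  | xs, [] => (xs, [])

def badSensor (sensor1 : List Int) (sensor2 : List Int) : Int :=
  let p := aLoop sensor1 sensor2
  let s1 := p.1
  let s2 := p.2
  if s1.length = 0 then -1
  else if PySem.List.slice s1 none (some (-1)) = PySem.List.slice s2 (some 1) none ∧
          PySem.List.slice s2 none (some (-1)) ≠ PySem.List.slice s1 (some 1) none then 1
  else if PySem.List.slice s2 none (some (-1)) = PySem.List.slice s1 (some 1) none ∧
          PySem.List.slice s1 none (some (-1)) ≠ PySem.List.slice s2 (some 1) none then 2
  else -1

-- ===== PORT B =====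
-- B's index scan: length of the common prefix (first mismatch index).
def altScan : List Int → List Int → Nat
  | x :: xs, y :: ys => if x = y then altScan xs ys + 1 else 0
  | _, _ => 0

def badSensor_alt (sensor1 : List Int) (sensor2 : List Int) : Int :=
  let i : Nat := altScan sensor1 sensor2
  if i = sensor1.length then -1
  else
    let dropped1 := PySem.List.slice sensor1 (some (i : Int)) (some (-1)) =
                    PySem.List.slice sensor2 (some ((i : Int) + 1)) none
    let dropped2 := PySem.List.slice sensor2 (some (i : Int)) (some (-1)) =
                    PySem.List.slice sensor1 (some ((i : Int) + 1)) none
    if (dropped1 ↔ dropped2) then -1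
    else if dropped1 then 1 else 2

-- ===== PRECONDITION & SPEC =====
-- Pre_ excludes exactly the inputs where A raises IndexError: sensor2 a proper prefix of
-- sensor1 (the stripping loop empties sensor2 and then evaluates sensor2[0]).
def Pre_badSensor (sensor1 : List Int) (sensor2 : List Int) : Prop :=
  ¬ (sensor2 <+: sensor1 ∧ sensor2.length < sensor1.length)
instance (sensor1 : List Int) (sensor2 : List Int) : Decidable (Pre_badSensor sensor1 sensor2) := by
  unfold Pre_badSensor; infer_instance
def pvWitness_badSensor : List Int × List Int := ([1, 2], [1, 3])

def Spec_badSensor (sensor1 : List Int) (sensor2 : List Int) (out : Int) : Prop := out = badSensor_alt sensor1 sensor2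
instance (sensor1 : List Int) (sensor2 : List Int) (out : Int) : Decidable (Spec_badSensor sensor1 sensor2 out) := by unfold Spec_badSensor; infer_instance

-- ===== CLAIM (what is proved, stated in full; the proofs are below) =====
def Claim_equal_badSensor : Prop := ∀ (sensor1 : List Int) (sensor2 : List Int), Dom_badSensor sensor1 sensor2 → Pre_badSensor sensor1 sensor2 → Spec_badSensor sensor1 sensor2 (badSensor sensor1 sensor2)

-- ===== LEMMAS AND PROOFS =====

theorem aLoop_eq_drop (s1 s2 : List Int) :
    aLoop s1 s2 = (s1.drop (altScan s1 s2), s2.drop (altScan s1 s2)) := by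
  induction s1 generalizing s2 with
  | nil => cases s2 <;> simp [aLoop, altScan]
  | cons x xs ih =>
    cases s2 with
    | nil => simp [aLoop, altScan]
    | cons y ys =>
      by_cases h : x = y <;> simp [aLoop, altScan, h, ih]

theorem altScan_le_left (s1 s2 : List Int) : altScan s1 s2 ≤ s1.length := by
  induction s1 generalizing s2 with
  | nil => cases s2 <;> simp [altScan]
  | cons x xs ih =>
    cases s2 with
    | nil => simp [altScan]
    | cons y ys =>
      by_cases h : x = y <;> simp [altScan, h]
      exact ih ys

-- B's slice sensor[i:-1] is dropLast of the stripped suffix (for a Nat index i).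
theorem slice_nat_neg_one (xs : List Int) (i : Nat) :
    PySem.List.slice xs (some (i : Int)) (some (-1)) = (xs.drop i).dropLast := by
  simp [PySem.List.slice, PySem.List.clampIdx, List.dropLast_eq_take, List.take_drop]
  rcases eq_or_ne xs [] with rfl | hne
  · simp
  · have hl : 0 < xs.length := List.length_pos_of_ne_nil hne
    have h0 : ¬((i : Int) < 0) := by omega
    simp only [if_neg h0, if_neg hne]
    have ht : ((xs.length : Int) + -1).toNat = xs.length - 1 := by omega
    rw [ht]
    rcases Nat.lt_or_ge xs.length i with hlt | hle
    · rw [min_eq_right (le_of_lt hlt)]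
      rw [List.drop_eq_nil_of_le, List.drop_eq_nil_of_le]
      · exact le_trans (by simp) (le_of_lt hlt)
      · simp
    · rw [min_eq_left hle]
      congr 2
      omega

-- B's slice sensor[i+1:] is the tail of the stripped suffix.
theorem slice_nat_succ (xs : List Int) (i : Nat) :
    PySem.List.slice xs (some ((i : Int) + 1)) none = xs.drop (i + 1) := by
  rw [show ((i : Int) + 1) = ((i + 1 : Nat) : Int) by push_cast; ring,
      PySem.List.slice_from_natCast]

theorem badSensor_eq (s1 s2 : List Int) : badSensor s1 s2 = badSensor_alt s1 s2 := by
  have hle1 := altScan_le_left s1 s2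
  simp only [badSensor, badSensor_alt, aLoop_eq_drop, PySem.List.slice_to_neg_one,
    PySem.List.slice_from_one, List.tail_drop, slice_nat_neg_one, slice_nat_succ,
    List.length_drop]
  by_cases hin : altScan s1 s2 = s1.length
  · rw [if_pos (by omega), if_pos hin]
  · rw [if_neg (by omega), if_neg hin]
    by_cases h1 : (s1.drop (altScan s1 s2)).dropLast = s2.drop (altScan s1 s2 + 1) <;>
    by_cases h2 : (s2.drop (altScan s1 s2)).dropLast = s1.drop (altScan s1 s2 + 1) <;>
      simp [h1, h2]

-- ===== VERDICT (by name: the statement is the Claim_ definition above) =====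
theorem badSensor_spec : Claim_equal_badSensor := by
  intro s1 s2 _ _
  exact badSensor_eq s1 s2
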